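-- pv_equiv track=rewrite | github.com/boisvert4427/youtube-videos | video_generator/generate_atp_vertical_timeline_moviepy.py | _short_player_name
-- ===== SOURCE A (Python) =====
-- def _short_player_name(full_name: str) -> str:
--     tokens = [t for t in full_name.strip().split() if t]
--     if len(tokens) <= 1:
--         return full_name.strip()
--     particles = {"de", "del", "da", "di", "du", "la", "le", "van", "von", "st", "saint"}
--     surname = [tokens[-1]]
--     i = len(tokens) - 2
--     while i >= 1 and tokens[i].lower() in particles:
--         surname.insert(0, tokens[i])
--         i -= 1
--     return f"{tokens[0][0]}. {' '.join(surname)}"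
-- ===== SOURCE B (Python) =====
-- def _short_player_name(full_name: str) -> str:
--     tokens = [t for t in full_name.strip().split() if t]
--     if len(tokens) <= 1:
--         return full_name.strip()
--     particles = {"de", "del", "da", "di", "du", "la", "le", "van", "von", "st", "saint"}
--     # forward scan: remember the last middle token that is NOT a particle
--     last_non_particle = 0
--     for j, tok in enumerate(tokens[1:-1], 1):
--         if tok.lower() not in particles:
--             last_non_particle = j
--     surname = tokens[last_non_particle + 1:]
--     return f"{tokens[0][0]}. {' '.join(surname)}"
-- ===== Notes on version B (the rewrite author's own statement) =====
-- stated objective: alternative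
-- what changed: Replaces the backward while-loop that prepends consecutive particle tokens onto the surname with a single forward pass over the middle tokens that records the last non-particle index and takes the token suffix from there.
import Mathlib
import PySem

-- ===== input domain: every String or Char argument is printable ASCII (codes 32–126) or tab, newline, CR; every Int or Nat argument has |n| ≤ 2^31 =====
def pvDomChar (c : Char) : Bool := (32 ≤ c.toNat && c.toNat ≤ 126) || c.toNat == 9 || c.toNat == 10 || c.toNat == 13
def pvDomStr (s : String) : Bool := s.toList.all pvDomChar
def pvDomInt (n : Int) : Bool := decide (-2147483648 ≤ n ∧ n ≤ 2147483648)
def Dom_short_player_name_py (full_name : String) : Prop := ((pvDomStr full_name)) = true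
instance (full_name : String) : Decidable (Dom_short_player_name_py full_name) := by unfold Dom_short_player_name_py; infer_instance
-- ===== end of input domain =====

-- B replaces A's backward particle-collecting while-loop by one forward scan over the
-- middle tokens that records the last non-particle index; same result, alternative shape.

-- ===== PORT A =====
def pvParticles : PySem.Set String :=
  PySem.Set.ofList ["de", "del", "da", "di", "du", "la", "le", "van", "von", "st", "saint"]

-- A's while-loop: Python's i (which stays ≥ 0) is the Nat argument; i = 0 fails 'i >= 1'.
def pvALoop (tokens : List String) : Nat → List String → List String
  | 0, surname => surname
  | i + 1, surname =>
    if PySem.Str.lower (PySem.List.pyGetD tokens ((i + 1 : Nat) : Int) "") ∈ pvParticles then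
      pvALoop tokens i (PySem.List.pyGetD tokens ((i + 1 : Nat) : Int) "" :: surname)
    else surname

def short_player_name_py (full_name : String) : String :=
  let tokens := (PySem.Str.split₀ (PySem.Str.strip full_name)).filter (fun t => t ≠ "")
  if tokens.length ≤ 1 then PySem.Str.strip full_name
  else
    let surname := pvALoop tokens (tokens.length - 2) [PySem.List.pyGetD tokens (-1) ""]
    -- tokens[0][0]: the IndexError branch is unreachable (split tokens are nonempty)
    let c := (PySem.Str.pyGet? (PySem.List.pyGetD tokens 0 "") 0).getD ' '
    PySem.Str.join "" [String.ofList [c], ". ", PySem.Str.join " " surname]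

-- ===== PORT B =====
def short_player_name_py_alt (full_name : String) : String :=
  let tokens := (PySem.Str.split₀ (PySem.Str.strip full_name)).filter (fun t => t ≠ "")
  if tokens.length ≤ 1 then PySem.Str.strip full_name
  else
    let lastNp := (PySem.List.enumerate (PySem.List.slice tokens (some 1) (some (-1))) 1).foldl
      (fun acc jt => if ¬ PySem.Str.lower jt.2 ∈ pvParticles then jt.1 else acc) 0
    let surname := PySem.List.slice tokens (some (lastNp + 1)) none
    let c := (PySem.Str.pyGet? (PySem.List.pyGetD tokens 0 "") 0).getD ' '
    PySem.Str.join "" [String.ofList [c], ". ", PySem.Str.join " " surname]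

-- ===== PRECONDITION & SPEC =====
def Spec_short_player_name_py (full_name : String) (out : String) : Prop := out = short_player_name_py_alt full_name
instance (full_name : String) (out : String) : Decidable (Spec_short_player_name_py full_name out) := by unfold Spec_short_player_name_py; infer_instance

-- ===== CLAIM (what is proved, stated in full; the proofs are below) =====
def Claim_equal_short_player_name_py : Prop := ∀ (full_name : String), Dom_short_player_name_py full_name → Spec_short_player_name_py full_name (short_player_name_py full_name)

-- ===== LEMMAS AND PROOFS =====

-- the maximal all-particle suffix of a list, for a predicate p
def pvSuffix (p : String → Bool) (l : List String) : List String :=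
  (l.reverse.takeWhile p).reverse

lemma pvSuffix_len_le (p : String → Bool) (l : List String) :
    (pvSuffix p l).length ≤ l.length := by
  simpa [pvSuffix] using
    (List.Sublist.length_le (List.takeWhile_sublist (l := l.reverse) (p := p))).trans (by simp)

lemma pvSuffix_all (p : String → Bool) (l : List String) (h : l.all p) :
    pvSuffix p l = l := by
  have : l.reverse.takeWhile p = l.reverse := by
    rw [List.takeWhile_eq_self_iff]
    intro x hx; exact (List.all_eq_true.mp h) x (List.mem_reverse.mp hx)
  simp [pvSuffix, this]

lemma pvSuffix_concat (p : String → Bool) (l : List String) (x : String) :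
    pvSuffix p (l ++ [x]) = if p x then pvSuffix p l ++ [x] else [] := by
  by_cases hx : p x <;> simp [pvSuffix, List.takeWhile, hx]

lemma pvSuffix_drop (p : String → Bool) (l : List String) :
    l.drop (l.length - (pvSuffix p l).length) = pvSuffix p l := by
  set S := pvSuffix p l with hS
  set A := (l.reverse.dropWhile p).reverse with hA
  have h : A ++ S = l := by
    rw [hA, hS, pvSuffix, ← List.reverse_append, List.takeWhile_append_dropWhile,
      List.reverse_reverse]
  rw [← h, List.length_append, Nat.add_sub_cancel, List.drop_left]

lemma pvSuffix_cons (p : String → Bool) (x : String) (xs : List String) :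
    pvSuffix p (x :: xs) =
      if xs.all p then (if p x then x :: xs else xs) else pvSuffix p xs := by
  by_cases hall : xs.all p
  · have hx : xs.reverse.takeWhile p = xs.reverse := by
      rw [List.takeWhile_eq_self_iff]
      intro y hy; exact (List.all_eq_true.mp hall) y (List.mem_reverse.mp hy)
    by_cases hpx : p x <;>
      simp [pvSuffix, List.takeWhile_append, hx, hpx, hall]
  · have hne : xs.reverse.takeWhile p ≠ xs.reverse := by
      intro hEq
      apply hall
      rw [List.all_eq_true]
      intro y hy
      exact List.mem_takeWhile_imp (by rw [hEq]; exact List.mem_reverse.mpr hy)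
    have hlt : (xs.reverse.takeWhile p).length ≠ xs.length := by
      intro hlen
      exact hne ((List.takeWhile_sublist (l := xs.reverse) (p := p)).eq_of_length
        (by simpa using hlen))
    simp [pvSuffix, List.takeWhile_append, hall, hlt]

lemma pvSuffix_all_len (p : String → Bool) (l : List String) (h : l.all p) :
    (pvSuffix p l).length = l.length := by rw [pvSuffix_all p l h]

-- the B-side fold computes (length - suffix length) shifted by the start index
lemma pvFold_eq (p : String → Bool) (l : List String) :
    ∀ (s acc : Int),
      (PySem.List.enumerate l s).foldl
        (fun acc jt => if ¬ p jt.2 = true then jt.1 else acc) acc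
      = if l.all p then acc else s + l.length - (pvSuffix p l).length - 1 := by
  induction l with
  | nil => intro s acc; simp [PySem.List.enumerate]
  | cons x xs ih =>
    intro s acc
    rw [PySem.List.enumerate_cons, List.foldl_cons, ih, pvSuffix_cons]
    have hle : ((pvSuffix p xs).length : Int) ≤ (xs.length : Int) := by
      exact_mod_cast pvSuffix_len_le p xs
    by_cases hall : xs.all p
    · have hlen : ((pvSuffix p xs).length : Int) = (xs.length : Int) := by
        exact_mod_cast pvSuffix_all_len p xs hall
      by_cases hpx : p x <;> simp [hpx, hall] <;> push_cast <;> omega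
    · by_cases hpx : p x <;> simp [hpx, hall] <;> push_cast <;> omega

def pvP (t : String) : Bool := decide (PySem.Str.lower t ∈ pvParticles)

-- the A-side loop collects exactly the all-particle suffix of the middle tokens
lemma pvALoop_eq (t0 z : String) (mid : List String) :
    ∀ (j : Nat), j ≤ mid.length → ∀ (s : List String),
      pvALoop (t0 :: (mid ++ [z])) j s = pvSuffix pvP (mid.take j) ++ s := by
  intro j
  induction j with
  | zero => intro _ s; simp [pvALoop, pvSuffix]
  | succ j ih =>
    intro hj s
    have hjlt : j < mid.length := by omega
    have hget : PySem.List.pyGetD (t0 :: (mid ++ [z])) ((j + 1 : Nat) : Int) "" = mid[j] := by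
      rw [PySem.List.pyGetD_natCast]
      simp [List.getD, List.getElem?_append_left hjlt, List.getElem?_eq_getElem hjlt]
    have htake : mid.take (j + 1) = mid.take j ++ [mid[j]] := by
      rw [List.take_add_one, List.getElem?_eq_getElem hjlt]; rfl
    rw [pvALoop, hget, htake, pvSuffix_concat]
    by_cases hp : PySem.Str.lower mid[j] ∈ pvParticles
    · rw [if_pos hp, if_pos (by simpa [pvP] using hp), ih (by omega)]
      simp
    · rw [if_neg hp, if_neg (by simpa [pvP] using hp)]
      simp

-- the two surname computations agree on any token list t0 :: mid ++ [z]
lemma pvSurname_eq (t0 z : String) (mid : List String) :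
    pvALoop (t0 :: (mid ++ [z])) ((t0 :: (mid ++ [z])).length - 2)
      [PySem.List.pyGetD (t0 :: (mid ++ [z])) (-1) ""]
    = PySem.List.slice (t0 :: (mid ++ [z]))
        (some ((PySem.List.enumerate (PySem.List.slice (t0 :: (mid ++ [z])) (some 1) (some (-1))) 1).foldl
          (fun acc jt => if ¬ PySem.Str.lower jt.2 ∈ pvParticles then jt.1 else acc) 0 + 1)) none := by
  have hlen : (t0 :: (mid ++ [z])).length - 2 = mid.length := by simp
  have hne : (t0 :: (mid ++ [z])) ≠ [] := by simp
  have hlast : PySem.List.pyGetD (t0 :: (mid ++ [z])) (-1) "" = z := by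
    rw [show (t0 :: (mid ++ [z])) = (t0 :: mid) ++ [z] by simp,
      PySem.List.pyGetD_neg_one_append_singleton]
  have hmid : PySem.List.slice (t0 :: (mid ++ [z])) (some 1) (some (-1)) = mid := by
    have h1 : PySem.List.slice (t0 :: (mid ++ [z])) (some ((1 : Nat) : Int)) (some (-((1 : Nat) : Int)))
        = mid := by
      rw [show (t0 :: (mid ++ [z])) = (t0 :: mid) ++ [z] by simp]
      simp [PySem.List.slice, PySem.List.clampIdx]
      rw [if_neg (by omega)]
      simp
    simpa using h1
  rw [hlen, hlast, hmid]
  rw [pvALoop_eq t0 z mid mid.length (le_refl _) [z], List.take_length]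
  have hfold := pvFold_eq pvP mid 1 0
  have hfold' : (PySem.List.enumerate mid 1).foldl
      (fun acc jt => if ¬ PySem.Str.lower jt.2 ∈ pvParticles then jt.1 else acc) (0 : Int)
      = (mid.length : Int) - (pvSuffix pvP mid).length := by
    have heq : (fun (acc : Int) (jt : Int × String) => if ¬ PySem.Str.lower jt.2 ∈ pvParticles then jt.1 else acc)
        = fun acc jt => if ¬ pvP jt.2 = true then jt.1 else acc := by
      funext acc jt
      simp [pvP]
    rw [heq, hfold]
    split_ifs with h
    · rw [pvSuffix_all_len pvP mid h]; omega
    · omega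
  rw [hfold']
  have hle := pvSuffix_len_le pvP mid
  have hnn : (0 : Int) ≤ (mid.length : Int) - (pvSuffix pvP mid).length + 1 := by omega
  rw [PySem.List.slice_from _ hnn]
  have htn : ((mid.length : Int) - (pvSuffix pvP mid).length + 1).toNat
      = (mid.length - (pvSuffix pvP mid).length) + 1 := by omega
  rw [htn]
  simp only [List.drop_succ_cons]
  rw [List.drop_append_of_le_length (by omega)]
  rw [pvSuffix_drop]

-- ===== VERDICT (by name: the statement is the Claim_ definition above) =====
theorem short_player_name_py_spec : Claim_equal_short_player_name_py := by
  intro full_name _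
  simp only [Spec_short_player_name_py, short_player_name_py, short_player_name_py_alt]
  set tokens := (PySem.Str.split₀ (PySem.Str.strip full_name)).filter (fun t => t ≠ "") with htok
  by_cases hlen : tokens.length ≤ 1
  · rw [if_pos hlen, if_pos hlen]
  · have h2 : 2 ≤ tokens.length := by omega
    obtain ⟨t0, rest, hT⟩ :=
      List.exists_cons_of_ne_nil (fun h => by rw [h] at h2; simp at h2 : tokens ≠ [])
    have hrne : rest ≠ [] := by
      intro h; rw [hT, h] at h2; simp at h2
    obtain ⟨mid, z, hR⟩ : ∃ mid z, rest = mid ++ [z] := by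
      refine ⟨rest.dropLast, rest.getLast hrne, ?_⟩
      exact (List.dropLast_append_getLast hrne).symm
    rw [if_neg hlen, if_neg hlen, hT, hR]
    rw [pvSurname_eq t0 z mid]
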